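-- pv_equiv track=rewrite | github.com/swarnabhK/Helsinki_python_solutions | part4/firstsecondlast.py | last_word2
-- ===== SOURCE A (Python) =====
-- def last_word2(st):
--   s = ""
--   for i in range(len(st)-1,-1,-1):
--     if st[i]==" ":
--       break
--     else:
--       s+=st[i]
--   return s[::-1]
-- ===== SOURCE B (Python) =====
-- def last_word2(st):
--   return st.split(" ")[-1]
-- ===== Notes on version B (the rewrite author's own statement) =====
-- stated objective: idiomatic
-- what changed: Replaces the backward character-by-character accumulation loop (with string reversal at the end) by a one-line split on the literal space taking the final token; the C-level split avoids per-character Python string concatenation.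
import Mathlib
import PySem

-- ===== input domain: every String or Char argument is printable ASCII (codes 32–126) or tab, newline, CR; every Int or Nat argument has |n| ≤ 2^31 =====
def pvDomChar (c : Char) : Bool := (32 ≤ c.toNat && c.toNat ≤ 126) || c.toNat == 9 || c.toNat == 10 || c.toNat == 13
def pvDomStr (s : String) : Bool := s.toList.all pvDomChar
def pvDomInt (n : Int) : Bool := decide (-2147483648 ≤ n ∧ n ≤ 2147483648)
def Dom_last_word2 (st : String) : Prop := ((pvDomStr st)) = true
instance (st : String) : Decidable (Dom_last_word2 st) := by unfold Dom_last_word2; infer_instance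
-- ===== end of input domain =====

-- B replaces A's backward character-accumulation loop by the idiomatic st.split(" ")[-1]; equivalent on all inputs (a timing run measured B faster by a constant factor).

-- ===== PORT A =====
-- the 'for i in range(len(st)-1,-1,-1): if st[i]==" ": break else: s += st[i]' loop
def lastWord2Go (cs : List Char) : List Int → List Char → List Char
  | [], s => s
  | i :: rest, s =>
    match PySem.List.pyGet? cs i with
    | none => s        -- unreachable: every i produced by the range is in bounds
    | some c => if c = ' ' then s else lastWord2Go cs rest (s ++ [c])

def last_word2 (st : String) : String :=
  let cs := st.toList
  let s := lastWord2Go cs (PySem.List.pyRange ((cs.length : Int) - 1) (-1) (-1)) []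
  String.ofList ((PySem.List.slice? s none none (-1)).getD [])   -- s[::-1]

-- ===== PORT B =====
def last_word2_alt (st : String) : String :=
  String.ofList ((PySem.List.pyGet? (PySem.Chars.splitOn st.toList [' ']) (-1)).getD [])

-- ===== PRECONDITION & SPEC =====
def Spec_last_word2 (st : String) (out : String) : Prop := out = last_word2_alt st
instance (st : String) (out : String) : Decidable (Spec_last_word2 st out) := by unfold Spec_last_word2; infer_instance

-- ===== CLAIM (what is proved, stated in full; the proofs are below) =====
def Claim_equal_last_word2 : Prop := ∀ (st : String), Dom_last_word2 st → Spec_last_word2 st (last_word2 st)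

-- ===== LEMMAS AND PROOFS =====

lemma getLastD_congr {α : Type} (l : List α) (h : l ≠ []) {d d' : α} :
    l.getLastD d = l.getLastD d' := by
  rw [List.getLastD_eq_getLast?, List.getLastD_eq_getLast?,
      List.getLast?_eq_some_getLast h]
  rfl

-- structural shape of PySem.Chars.splitOn.go for the single-space separator
def spGo (cur : List Char) : List Char → List (List Char)
  | [] => [cur.reverse]
  | c :: rest => if c = ' ' then cur.reverse :: spGo [] rest else spGo (c :: cur) rest

lemma splitOn_go_eq (l cur : List Char) (acc : List (List Char)) (fuel : Nat) (hf : l.length ≤ fuel) :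
    PySem.Chars.splitOn.go [' '] fuel l cur acc = acc.reverse ++ spGo cur l := by
  induction l generalizing cur acc fuel with
  | nil =>
    cases fuel <;> simp [PySem.Chars.splitOn.go, spGo]
  | cons c rest ih =>
    cases fuel with
    | zero => simp at hf
    | succ f =>
      simp only [PySem.Chars.splitOn.go, spGo]
      by_cases hc : c = ' '
      · subst hc
        rw [if_pos (by simp [List.isPrefixOf])]
        simp only [List.length_cons, List.length_nil, List.drop_succ_cons, List.drop_zero]
        rw [ih [] (cur.reverse :: acc) f (by simpa using hf)]
        simp
      · rw [if_neg (by simp [List.isPrefixOf]; exact fun h => hc h.symm)]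
        rw [ih (c :: cur) acc f (by simpa using hf), if_neg hc]

lemma spGo_ne_nil (cur l : List Char) : spGo cur l ≠ [] := by
  induction l generalizing cur with
  | nil => simp [spGo]
  | cons c rest ih => simp only [spGo]; split <;> simp [ih]

lemma takeWhile_append_of_mem {xs ys : List Char} (h : ' ' ∈ xs) :
    List.takeWhile (fun c => !(c == ' ')) (xs ++ ys) = List.takeWhile (fun c => !(c == ' ')) xs := by
  rw [List.takeWhile_append, if_neg]
  intro hlen
  have heq := List.Sublist.eq_of_length (List.takeWhile_sublist (l := xs)
    (p := fun c => !(c == ' '))) hlen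
  have := List.takeWhile_eq_self_iff.mp heq ' ' h
  simp at this

lemma spGo_getLastD (l cur : List Char) :
    (spGo cur l).getLastD [] =
      if ' ' ∈ l then (List.takeWhile (fun c => !(c == ' ')) l.reverse).reverse
      else cur.reverse ++ l := by
  induction l generalizing cur with
  | nil => simp [spGo]
  | cons c rest ih =>
    by_cases hc : c = ' '
    · subst hc
      simp only [spGo, List.mem_cons, true_or, if_pos, List.reverse_cons]
      rw [List.getLastD_cons, getLastD_congr _ (spGo_ne_nil [] rest) (d' := []), ih []]
      by_cases hr : ' ' ∈ rest
      · rw [if_pos hr, takeWhile_append_of_mem (by simpa using hr)]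
      · rw [if_neg hr]
        have hall : ∀ x ∈ rest.reverse, (fun c => !(c == ' ')) x = true := by
          intro x hx; simp at hx ⊢; intro h; exact hr (h ▸ hx)
        rw [List.takeWhile_append, if_pos (by rw [List.takeWhile_eq_self_iff.mpr hall])]
        simp
    · simp only [spGo, if_neg hc]
      rw [ih (c :: cur)]
      have hm : (' ' ∈ c :: rest) ↔ (' ' ∈ rest) := by
        simp; intro h; exact absurd h.symm hc
      by_cases hr : ' ' ∈ rest
      · rw [if_pos hr, if_pos (hm.mpr hr), List.reverse_cons,
            takeWhile_append_of_mem (by simpa using hr)]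
      · rw [if_neg hr, if_neg (fun h => hr (hm.mp h))]
        simp

-- A's loop over range(k-1,-1,-1) reads the reversed prefix and takes until a space
lemma lastWord2Go_eq (cs : List Char) (k : Nat) (hk : k ≤ cs.length) (acc : List Char) :
    lastWord2Go cs (PySem.List.pyRange ((k : Int) - 1) (-1) (-1)) acc =
      acc ++ List.takeWhile (fun c => !(c == ' ')) (cs.take k).reverse := by
  induction k generalizing acc with
  | zero => simp [lastWord2Go]
  | succ k ih =>
    rw [show ((k + 1 : Nat) : Int) - 1 = (k : Int) by omega,
        PySem.List.pyRange_neg_one_cons (by omega : (-1:Int) < (k : Int))]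
    have hlt : k < cs.length := by omega
    have hget : PySem.List.pyGet? cs (k : Int) = some cs[k] := by
      unfold PySem.List.pyGet? PySem.List.pyIdx?
      rw [if_pos (by omega), if_pos (by exact_mod_cast hlt)]
      simp
    rw [List.take_add_one, List.getElem?_eq_getElem hlt]
    simp only [lastWord2Go, hget, Option.toList_some, List.reverse_append, List.reverse_cons,
      List.reverse_nil, List.nil_append, List.singleton_append, List.takeWhile_cons]
    by_cases hc : cs[k] = ' '
    · simp [hc]
    · rw [if_neg hc, ih (by omega), if_pos (by simp [hc])]
      simp

lemma pyGet?_neg_one_getD {α : Type} (l : List α) (h : l ≠ []) (d : α) :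
    (PySem.List.pyGet? l (-1)).getD d = l.getLastD d := by
  have hl : 0 < l.length := List.length_pos_iff.mpr h
  unfold PySem.List.pyGet? PySem.List.pyIdx?
  rw [if_neg (by omega), if_pos (by omega)]
  simp [List.getLastD_eq_getLast?, List.getLast?_eq_getElem?]

-- ===== VERDICT (by name: the statement is the Claim_ definition above) =====
theorem last_word2_spec : Claim_equal_last_word2 := by
  intro st _
  unfold Spec_last_word2 last_word2 last_word2_alt
  simp only
  rw [lastWord2Go_eq st.toList st.toList.length le_rfl [], List.take_length,
      PySem.List.slice?_none_none_neg_one, Option.getD_some, List.nil_append]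
  have hsplit : PySem.Chars.splitOn st.toList [' '] = spGo [] st.toList := by
    unfold PySem.Chars.splitOn
    rw [splitOn_go_eq _ _ _ _ (by omega)]
    simp
  rw [hsplit, pyGet?_neg_one_getD _ (spGo_ne_nil _ _), spGo_getLastD]
  by_cases h : ' ' ∈ st.toList
  · rw [if_pos h]
  · rw [if_neg h]
    have hall : List.takeWhile (fun c => !(c == ' ')) st.toList.reverse = st.toList.reverse :=
      List.takeWhile_eq_self_iff.mpr (by
        intro x hx; simp at hx ⊢; intro he; exact h (he ▸ hx))
    rw [hall, List.reverse_reverse]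
    simp
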